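-- pv_equiv track=rewrite | github.com/fahkrymalta21/Tucil-1-Stima | src/Tucil1_Stima.py | Result
-- ===== SOURCE A (Python) =====
-- def Result(List1, List2, List3):
--     x = int
--     sum = 0
--     for i in range(len(List1)):
--         for j in range(len(List1[i])):
--             for k in range(len(List2)):
--                 if List2[k] == List1[i][j]:
--                     x = (10**(len(List1[i]) - j - 1))*List3[k]
--                     sum += x
--     return(sum)
-- ===== SOURCE B (Python) =====
-- def Result(List1, List2, List3):
--     pv = {}
--     for row in List1:
--         place = 1
--         for s in reversed(row):
--             pv[s] = pv.get(s, 0) + place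
--             place *= 10
--     total = 0
--     for s, v in zip(List2, List3):
--         total += v * pv.get(s, 0)
--     return total
-- ===== Notes on version B (the rewrite author's own statement) =====
-- stated objective: faster
-- what changed: Flips the aggregation: instead of looking up each matrix position's symbol in the symbol list, B makes one pass over List1 building a dict symbol -> total positional weight (sum of 10^place over all occurrences), then computes the answer in a single pass over the (List2,List3) pairs as sum of value * positional-weight, with no lookup per position at all.
import Mathlib
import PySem

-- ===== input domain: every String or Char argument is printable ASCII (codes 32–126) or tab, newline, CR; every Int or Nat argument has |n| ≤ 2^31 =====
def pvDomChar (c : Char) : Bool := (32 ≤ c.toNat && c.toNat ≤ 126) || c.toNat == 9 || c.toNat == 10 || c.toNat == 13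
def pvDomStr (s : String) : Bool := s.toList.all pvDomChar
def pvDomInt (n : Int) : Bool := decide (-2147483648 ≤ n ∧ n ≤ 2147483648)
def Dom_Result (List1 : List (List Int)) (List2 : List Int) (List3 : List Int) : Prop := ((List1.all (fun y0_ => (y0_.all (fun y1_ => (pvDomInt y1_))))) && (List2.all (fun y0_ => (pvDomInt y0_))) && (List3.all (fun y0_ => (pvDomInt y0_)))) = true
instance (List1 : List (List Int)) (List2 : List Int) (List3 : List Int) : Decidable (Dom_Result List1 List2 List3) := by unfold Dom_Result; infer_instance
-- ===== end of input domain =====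

-- B flips the aggregation: one pass over List1 builds a dict symbol -> total positional weight,
-- then one pass over the (List2, List3) pairs sums value * weight (objective: faster).

-- ===== PORT A =====
def Result (List1 : List (List Int)) (List2 : List Int) (List3 : List Int) : Int :=
  (List.range List1.length).foldl (fun sum i =>
    let row := List1.getD i []
    (List.range row.length).foldl (fun sum j =>
      (List.range List2.length).foldl (fun sum k =>
        if List2.getD k 0 = row.getD j 0 then
          sum + ((10 : Int) ^ (row.length - j - 1)) * List3.getD k 0
        else sum) sum) sum) 0

-- ===== PORT B =====
def Result_alt (List1 : List (List Int)) (List2 : List Int) (List3 : List Int) : Int :=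
  let pv : PySem.Dict Int Int :=
    List1.foldl (fun d row =>
      (row.reverse.foldl
        (fun acc s => (acc.1.insert s (acc.1.getD s 0 + acc.2), acc.2 * 10))
        (d, (1 : Int))).1) PySem.Dict.empty
  (List2.zip List3).foldl (fun total p => total + p.2 * pv.getD p.1 0) 0

-- ===== PRECONDITION & SPEC =====
-- Pre_ excludes exactly the inputs where A raises IndexError: a symbol of List1 equal to
-- List2[k] for some k ≥ len(List3) makes A evaluate List3[k].
def Pre_Result (List1 : List (List Int)) (List2 : List Int) (List3 : List Int) : Prop :=
  ∀ x ∈ List2.drop List3.length, x ∉ List1.flatten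
instance (List1 : List (List Int)) (List2 : List Int) (List3 : List Int) : Decidable (Pre_Result List1 List2 List3) := by unfold Pre_Result; infer_instance

def pvWitness_Result : List (List Int) × List Int × List Int := ([[1, 2], [3]], [1, 3], [10, 20])

def Spec_Result (List1 : List (List Int)) (List2 : List Int) (List3 : List Int) (out : Int) : Prop := out = Result_alt List1 List2 List3
instance (List1 : List (List Int)) (List2 : List Int) (List3 : List Int) (out : Int) : Decidable (Spec_Result List1 List2 List3 out) := by unfold Spec_Result; infer_instance

-- ===== CLAIM (what is proved, stated in full; the proofs are below) =====
def Claim_equal_Result : Prop := ∀ (List1 : List (List Int)) (List2 : List Int) (List3 : List Int), Dom_Result List1 List2 List3 → Pre_Result List1 List2 List3 → Spec_Result List1 List2 List3 (Result List1 List2 List3)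

-- ===== LEMMAS AND PROOFS =====

-- total List3 value matched by symbol v among the in-range pairs
def wsum (List2 List3 : List Int) (v : Int) : Int :=
  ((List2.zip List3).map (fun p => if p.1 = v then p.2 else 0)).sum

-- place-value sum of a row read least-significant-first
def rsum (m : Int → Int) : List Int → Int
  | [] => 0
  | a :: l => m a + 10 * rsum m l

-- positional weight of symbol v in a row read least-significant-first
def psum (v : Int) : List Int → Int
  | [] => 0
  | a :: l => (if a = v then 1 else 0) + 10 * psum v l

-- a foldl over range(len l) reading l.getD is a foldl over l
theorem foldl_range_getD {α β : Type} (l : List α) (d : α) (F : β → α → β) (init : β) :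
    (List.range l.length).foldl (fun s i => F s (l.getD i d)) init = l.foldl F init := by
  induction l generalizing init with
  | nil => rfl
  | cons a t ih =>
    simp only [List.length_cons, List.range_succ_eq_map, List.foldl_cons, List.foldl_map,
      List.getD_cons_zero, List.getD_cons_succ]
    exact ih (F init a)

-- A's inner k-loop sums e * wsum, provided no matched index is out of range for List3
theorem innerSum_eq (List2 List3 : List Int) (v e : Int)
    (hv : ∀ x ∈ List2.drop List3.length, x ≠ v) :
    ((List.range List2.length).map
        (fun k => if List2.getD k 0 = v then e * List3.getD k 0 else 0)).sum
      = e * wsum List2 List3 v := by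
  induction List2 generalizing List3 with
  | nil => simp [wsum]
  | cons a t ih =>
    cases List3 with
    | nil =>
      simp only [List.length_nil, List.drop_zero] at hv
      have ha : a ≠ v := hv a (List.mem_cons_self ..)
      simp [List.range_succ_eq_map, wsum, Function.comp_def]
    | cons b u =>
      have hv' : ∀ x ∈ t.drop u.length, x ≠ v := by
        intro x hx; exact hv x (by simpa using hx)
      simp only [List.length_cons, List.range_succ_eq_map, List.map_cons, List.map_map,
        List.sum_cons, List.getD_cons_zero, Function.comp_def, List.getD_cons_succ]
      rw [ih u hv']
      simp only [wsum, List.zip_cons_cons, List.map_cons, List.sum_cons]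
      split_ifs <;> ring

theorem rsum_append_singleton (m : Int → Int) (l : List Int) (a : Int) :
    rsum m (l ++ [a]) = rsum m l + 10 ^ l.length * m a := by
  induction l with
  | nil => simp [rsum]
  | cons b l ih => simp [rsum, ih, pow_succ]; ring

-- A's per-row place-value sum equals rsum over the reversed row
theorem range_sum_rsum (m : Int → Int) (row : List Int) :
    ((List.range row.length).map
        (fun j => (10 : Int) ^ (row.length - j - 1) * m (row.getD j 0))).sum
      = rsum m row.reverse := by
  induction row with
  | nil => simp [rsum]
  | cons a t ih =>
    simp only [List.length_cons, List.range_succ_eq_map, List.map_cons, List.map_map,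
      List.sum_cons, List.getD_cons_zero, Function.comp_def, List.getD_cons_succ,
      List.reverse_cons, rsum_append_singleton]
    rw [show (fun j => (10 : Int) ^ (t.length + 1 - (j + 1) - 1) * m (t.getD j 0))
          = (fun j => (10 : Int) ^ (t.length - j - 1) * m (t.getD j 0)) from by
        funext j; congr 2; omega,
      ih]
    simp [List.length_reverse]; ring

-- B's inner row loop: the dict gains p * psum v l at every key v
theorem rowDict_getD (l : List Int) (d : PySem.Dict Int Int) (p v : Int) :
    ((l.foldl (fun acc s => (acc.1.insert s (acc.1.getD s 0 + acc.2), acc.2 * 10))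
        (d, p)).1).getD v 0
      = d.getD v 0 + p * psum v l := by
  induction l generalizing d p with
  | nil => simp [psum]
  | cons a l ih =>
    simp only [List.foldl_cons, ih, psum, PySem.Dict.getD_insert]
    by_cases h : v = a
    · subst h; simp; ring
    · rw [if_neg h, if_neg (Ne.symm h)]; ring

-- B's outer loop: the dict holds the total positional weight of v over all rows
theorem pvDict_getD (L1 : List (List Int)) (d : PySem.Dict Int Int) (v : Int) :
    ((L1.foldl (fun d row =>
        (row.reverse.foldl
          (fun acc s => (acc.1.insert s (acc.1.getD s 0 + acc.2), acc.2 * 10))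
          (d, (1 : Int))).1) d).getD v 0)
      = d.getD v 0 + (L1.map (fun row => psum v row.reverse)).sum := by
  induction L1 generalizing d with
  | nil => simp
  | cons r L ih =>
    simp only [List.foldl_cons, List.map_cons, List.sum_cons, ih, rowDict_getD]
    ring

theorem mul_sum_list {α : Type} (l : List α) (b : Int) (f : α → Int) :
    (l.map (fun x => b * f x)).sum = b * (l.map f).sum := by
  induction l with
  | nil => simp
  | cons a l ih => simp [ih, mul_add]

-- exchange on one row: rsum of matched values = sum over pairs of value * weight
theorem zipsum_cons (Z : List (Int × Int)) (a : Int) (l : List Int) :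
    (Z.map (fun p => p.2 * psum p.1 (a :: l))).sum
      = (Z.map (fun p => if p.1 = a then p.2 else 0)).sum
        + 10 * (Z.map (fun p => p.2 * psum p.1 l)).sum := by
  have hfun : (fun p : Int × Int => p.2 * psum p.1 (a :: l))
      = fun p => (if p.1 = a then p.2 else 0) + 10 * (p.2 * psum p.1 l) := by
    funext p
    simp only [psum]
    by_cases h : p.1 = a
    · rw [if_pos h, if_pos h.symm]; ring
    · rw [if_neg h, if_neg (fun e => h e.symm)]; ring
  rw [hfun, List.sum_map_add, mul_sum_list]

theorem rsum_eq_zipsum (L2 L3 : List Int) (l : List Int) :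
    rsum (wsum L2 L3) l = ((L2.zip L3).map (fun p => p.2 * psum p.1 l)).sum := by
  induction l with
  | nil => simp [rsum, psum]
  | cons a l ih => rw [rsum, ih, zipsum_cons, wsum]

-- swap the two summations
theorem sum_swap_list {α β : Type} (L : List α) (Z : List β) (h : β → α → Int) :
    (L.map (fun r => (Z.map (fun p => h p r)).sum)).sum
      = (Z.map (fun p => (L.map (fun r => h p r)).sum)).sum := by
  induction L with
  | nil => simp
  | cons r L ih => simp only [List.map_cons, List.sum_cons, ih, List.sum_map_add]

-- ===== VERDICT (by name: the statement is the Claim_ definition above) =====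
theorem Result_spec : Claim_equal_Result := by
  intro L1 L2 L3 _dom hpre
  unfold Spec_Result Result Result_alt
  set m := wsum L2 L3 with hm
  have hpv : ∀ v : Int, ((L1.foldl (fun d row =>
      (row.reverse.foldl
        (fun acc s => (acc.1.insert s (acc.1.getD s 0 + acc.2), acc.2 * 10))
        (d, (1 : Int))).1) PySem.Dict.empty).getD v 0)
      = (L1.map (fun row => psum v row.reverse)).sum := by
    intro v; rw [pvDict_getD]; simp
  simp only [hpv]
  -- A's per-row computation equals s + rsum m row.reverse (uses hpre for in-range matches)
  have hA : ∀ (s : Int) (row : List Int), row ∈ L1 →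
      (List.range row.length).foldl (fun s j =>
        (List.range L2.length).foldl (fun s k =>
          if L2.getD k 0 = row.getD j 0 then
            s + ((10 : Int) ^ (row.length - j - 1)) * L3.getD k 0
          else s) s) s = s + rsum m row.reverse := by
    intro s row hrow
    have hj : ∀ (s : Int) (j : Nat), j ∈ List.range row.length →
        (List.range L2.length).foldl (fun s k =>
          if L2.getD k 0 = row.getD j 0 then
            s + ((10 : Int) ^ (row.length - j - 1)) * L3.getD k 0
          else s) s
          = s + (10 : Int) ^ (row.length - j - 1) * m (row.getD j 0) := by
      intro s j hjmem
      have hjlen : j < row.length := List.mem_range.mp hjmem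
      have hvmem : row.getD j 0 ∈ row := by
        rw [List.getD_eq_getElem row 0 hjlen]; exact List.getElem_mem hjlen
      have hvflat : row.getD j 0 ∈ L1.flatten := List.mem_flatten_of_mem hrow hvmem
      have hv : ∀ x ∈ L2.drop L3.length, x ≠ row.getD j 0 := by
        intro x hx hxe; exact hpre x hx (hxe ▸ hvflat)
      calc (List.range L2.length).foldl (fun s k =>
            if L2.getD k 0 = row.getD j 0 then
              s + ((10 : Int) ^ (row.length - j - 1)) * L3.getD k 0
            else s) s
          = (List.range L2.length).foldl (fun s k =>
              s + (if L2.getD k 0 = row.getD j 0 then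
                ((10 : Int) ^ (row.length - j - 1)) * L3.getD k 0 else 0)) s := by
            apply PySem.List.foldl_congr_mem
            intro acc k _; split_ifs <;> simp
        _ = s + (10 : Int) ^ (row.length - j - 1) * m (row.getD j 0) := by
            rw [PySem.List.foldl_add, innerSum_eq L2 L3 (row.getD j 0) _ hv, hm]
    calc (List.range row.length).foldl (fun s j =>
          (List.range L2.length).foldl (fun s k =>
            if L2.getD k 0 = row.getD j 0 then
              s + ((10 : Int) ^ (row.length - j - 1)) * L3.getD k 0
            else s) s) s
        = (List.range row.length).foldl (fun s j =>
            s + (10 : Int) ^ (row.length - j - 1) * m (row.getD j 0)) s := by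
          apply PySem.List.foldl_congr_mem
          intro acc j hjmem; exact hj acc j hjmem
      _ = s + rsum m row.reverse := by
          rw [PySem.List.foldl_add, range_sum_rsum]
  calc (List.range L1.length).foldl (fun sum i =>
        let row := L1.getD i []
        (List.range row.length).foldl (fun sum j =>
          (List.range L2.length).foldl (fun sum k =>
            if L2.getD k 0 = row.getD j 0 then
              sum + ((10 : Int) ^ (row.length - j - 1)) * L3.getD k 0
            else sum) sum) sum) 0
      = L1.foldl (fun s row =>
          (List.range row.length).foldl (fun s j =>
            (List.range L2.length).foldl (fun s k =>
              if L2.getD k 0 = row.getD j 0 then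
                s + ((10 : Int) ^ (row.length - j - 1)) * L3.getD k 0
              else s) s) s) 0 :=
        foldl_range_getD L1 ([] : List Int) (fun s row =>
          (List.range row.length).foldl (fun s j =>
            (List.range L2.length).foldl (fun s k =>
              if L2.getD k 0 = row.getD j 0 then
                s + ((10 : Int) ^ (row.length - j - 1)) * L3.getD k 0
              else s) s) s) 0
    _ = L1.foldl (fun s row => s + rsum m row.reverse) 0 := by
        apply PySem.List.foldl_congr_mem'
        intro row hrow acc; exact hA acc row hrow
    _ = 0 + (L1.map (fun row => rsum m row.reverse)).sum := PySem.List.foldl_add _ _ _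
    _ = (L1.map (fun row =>
          ((L2.zip L3).map (fun p => p.2 * psum p.1 row.reverse)).sum)).sum := by
        rw [zero_add, hm]; simp only [rsum_eq_zipsum]
    _ = ((L2.zip L3).map (fun p =>
          (L1.map (fun row => p.2 * psum p.1 row.reverse)).sum)).sum :=
        sum_swap_list L1 (L2.zip L3) (fun p r => p.2 * psum p.1 r.reverse)
    _ = ((L2.zip L3).map (fun p =>
          p.2 * (L1.map (fun row => psum p.1 row.reverse)).sum)).sum := by
        simp only [mul_sum_list]
    _ = (L2.zip L3).foldl (fun total p =>
          total + p.2 * (L1.map (fun row => psum p.1 row.reverse)).sum) 0 := by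
        rw [PySem.List.foldl_add, zero_add]
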